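-- pv_equiv track=rewrite | github.com/SOLSD/New-Power-Index | Interim Report and Program/algo_work/program_files/find_mwc.py | generate_coalitions
-- ===== SOURCE A (Python) =====
-- from itertools import combinations
--
-- def generate_coalitions(lst, target):
--     """
--     Finds all combinations needed from parties
--
--     Takes the list of parties and cycles through,
--     creating a list of all winning combinations.
--
--     """
--     list_of_mwc = []
--     index = 0
--     for i in range(1, len(lst)+1):
--         combination = list(combinations(lst, i))  # Finds all combinations of size i from lst
--         # list function coverts into list format, result is a list of all combinations of size i
--         for j in range(len(combination)):
--             coalition_to_test = list(combination[j])  # Each combination in list is extracted to then be tested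
--             total = 0
--             for k in range(len(coalition_to_test)):
--                 total += coalition_to_test[k][-1]  # Total is the sum of the votes in each coalition
--             if minimal_test(coalition_to_test, total, target):
--                 list_of_mwc.insert(index, coalition_to_test)
--     return list_of_mwc
--
-- def minimal_test(combination, total, target):
--     """
--     Takes combination and checks if it is minimal
--
--     The each party's votes are removed from the total one at a time
--     and if for all parties, each time that happens the total is
--     smaller than the target, the combination is minimal.
--     """
--     count = 0
--     for i in range(len(combination)):
--         check = total - combination[i][-1]
--         if check < target:
--             count += 1
--     if count == len(combination) and total >= target:
--         return True
--     return False
-- ===== SOURCE B (Python) =====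
-- def generate_coalitions(lst, target):
--     """Breadth-first search over the subset lattice with incremental vote sums,
--     pruning every extension of an already-winning coalition (supersets of a
--     winning coalition are never minimal)."""
--     results = []
--     frontier = [([], lst, 0)]  # (coalition, parties still available after it, vote sum)
--     while frontier:
--         new_frontier = []
--         for coalition, rest, s in frontier:
--             for j, p in enumerate(rest):
--                 c2 = coalition + [p]
--                 s2 = s + p[-1]
--                 if s2 >= target:
--                     if all(s2 - q[-1] < target for q in c2):
--                         results.append(c2)
--                 else:
--                     new_frontier.append((c2, rest[j + 1:], s2))
--         frontier = new_frontier
--     return results[::-1]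
-- ===== Notes on version B (the rewrite author's own statement) =====
-- stated objective: alternative
-- what changed: Replaces the size-by-size scan of all itertools.combinations with a per-coalition sum recomputed from scratch by a breadth-first search of the subset lattice that carries incremental vote sums and prunes every extension of an already-winning coalition (supersets of winning coalitions are never minimal), reversing the collected results at the end.
import Mathlib
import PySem

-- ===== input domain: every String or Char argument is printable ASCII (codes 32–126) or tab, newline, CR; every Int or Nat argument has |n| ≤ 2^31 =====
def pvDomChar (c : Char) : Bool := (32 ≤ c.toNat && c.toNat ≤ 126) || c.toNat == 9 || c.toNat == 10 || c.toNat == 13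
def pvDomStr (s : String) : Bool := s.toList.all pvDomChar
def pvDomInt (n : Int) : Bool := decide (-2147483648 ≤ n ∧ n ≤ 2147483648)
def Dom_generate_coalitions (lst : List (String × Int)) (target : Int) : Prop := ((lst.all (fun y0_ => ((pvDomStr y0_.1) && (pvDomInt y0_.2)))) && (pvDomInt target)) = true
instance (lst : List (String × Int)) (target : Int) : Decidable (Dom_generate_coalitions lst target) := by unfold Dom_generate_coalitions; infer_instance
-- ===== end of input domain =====

-- B replaces A's size-by-size scan of ALL combinations (itertools.combinations, sum recomputed
-- per coalition) by a breadth-first search of the subset lattice with incremental vote sums that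
-- prunes every extension of an already-winning coalition; same return value.

-- ===== PORT A =====

-- port of itertools.combinations(lst, k) (lexicographic order of index tuples)
def combosA : List (String × Int) → Nat → List (List (String × Int))
  | _, 0 => [[]]
  | [], _ + 1 => []
  | x :: xs, k + 1 => (combosA xs k).map (fun c => x :: c) ++ combosA xs (k + 1)

def minimal_test (combination : List (String × Int)) (total target : Int) : Bool :=
  -- for i in range(...): if total - combination[i][-1] < target: count += 1
  let count : Int := combination.foldl (fun cnt p => if total - p.2 < target then cnt + 1 else cnt) 0
  if count = (combination.length : Int) ∧ target ≤ total then true else false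

def generate_coalitions (lst : List (String × Int)) (target : Int) : List (List (String × Int)) :=
  (PySem.List.pyRange 1 (lst.length + 1) 1).foldl (fun acc i =>
    (combosA lst i.toNat).foldl (fun acc2 c =>
      let total := c.foldl (fun t k => t + k.2) 0
      if minimal_test c total target then PySem.List.insert acc2 0 c else acc2) acc) []

-- ===== PORT B =====

-- inner loop of Source B: extend one frontier entry (coalition c, available rest, running sum s)
def altExpand (target : Int) (c : List (String × Int)) (s : Int) :
    List (String × Int) →
    List (List (String × Int)) × List (List (String × Int) × List (String × Int) × Int)
  | [] => ([], [])
  | p :: rest =>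
    let c2 := c ++ [p]
    let s2 := s + p.2
    let r := altExpand target c s rest
    if target ≤ s2 then
      if c2.all (fun q => decide (s2 - q.2 < target)) then (c2 :: r.1, r.2) else r
    else (r.1, (c2, rest, s2) :: r.2)

-- one pass over the frontier, concatenating the appended results / new frontier entries
def altLevel (target : Int) :
    List (List (String × Int) × List (String × Int) × Int) →
    List (List (String × Int)) × List (List (String × Int) × List (String × Int) × Int)
  | [] => ([], [])
  | e :: es =>
    let r1 := altExpand target e.1 e.2.2 e.2.1
    let r2 := altLevel target es
    (r1.1 ++ r2.1, r1.2 ++ r2.2)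

-- while frontier: … (fuel bounds the number of levels; lst.length + 1 always suffices
-- because every new entry's 'rest' is strictly shorter than its parent's)
def altLoop (target : Int) :
    Nat → List (List (String × Int) × List (String × Int) × Int) → List (List (String × Int))
  | _, [] => []
  | 0, _ :: _ => []
  | fuel + 1, e :: es =>
    let r := altLevel target (e :: es)
    r.1 ++ altLoop target fuel r.2

def generate_coalitions_alt (lst : List (String × Int)) (target : Int) : List (List (String × Int)) :=
  (altLoop target (lst.length + 1) [([], lst, 0)]).reverse  -- results[::-1]

-- ===== PRECONDITION & SPEC =====
def Spec_generate_coalitions (lst : List (String × Int)) (target : Int) (out : List (List (String × Int))) : Prop := out = generate_coalitions_alt lst target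
instance (lst : List (String × Int)) (target : Int) (out : List (List (String × Int))) : Decidable (Spec_generate_coalitions lst target out) := by unfold Spec_generate_coalitions; infer_instance

-- ===== CLAIM (what is proved, stated in full; the proofs are below) =====
def Claim_equal_generate_coalitions : Prop := ∀ (lst : List (String × Int)) (target : Int), Dom_generate_coalitions lst target → Spec_generate_coalitions lst target (generate_coalitions lst target)

-- ===== LEMMAS AND PROOFS =====

-- vote sum of a coalition
def Sm (c : List (String × Int)) : Int := (c.map Prod.snd).sum

-- "c is a minimal winning coalition"
def mini (target : Int) (c : List (String × Int)) : Bool :=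
  decide (target ≤ Sm c) && c.all (fun q => decide (Sm c - q.2 < target))

-- "every nonempty prefix of c (including c itself) is losing": the frontier invariant
def goodF (target : Int) (c : List (String × Int)) : Bool :=
  c.inits.all (fun pre => pre.isEmpty || decide (Sm pre < target))

-- combinations paired with the suffix of lst that follows their last element
def CW : List (String × Int) → Nat → List (List (String × Int) × List (String × Int))
  | l, 0 => [([], l)]
  | [], _ + 1 => []
  | x :: xs, k + 1 => (CW xs k).map (fun cr => (x :: cr.1, cr.2)) ++ CW xs (k + 1)

-- all one-element extensions of a (combination, rest) pair
def childL : List (String × Int) × List (String × Int) → List (List (String × Int) × List (String × Int))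
  | (_, []) => []
  | (c, p :: r) => (c ++ [p], r) :: childL (c, r)

-- the frontier after k levels
def frontK (lst : List (String × Int)) (target : Int) (k : Nat) :
    List (List (String × Int) × List (String × Int) × Int) :=
  ((CW lst k).filter (fun cr => goodF target cr.1)).map (fun cr => (cr.1, cr.2, Sm cr.1))

-- the minimal winning coalitions of size k, in combosA order
def AllR (lst : List (String × Int)) (target : Int) (k : Nat) : List (List (String × Int)) :=
  (combosA lst k).filter (mini target)

-- results of levels k+1, k+2, … (fuel many)
def ARs (lst : List (String × Int)) (target : Int) : Nat → Nat → List (List (String × Int))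
  | _, 0 => []
  | k, fuel + 1 => AllR lst target (k + 1) ++ ARs lst target (k + 1) fuel

theorem Sm_append (c : List (String × Int)) (p : String × Int) : Sm (c ++ [p]) = Sm c + p.2 := by
  simp [Sm]


theorem CW_map_fst (l : List (String × Int)) (k : Nat) : (CW l k).map Prod.fst = combosA l k := by
  induction l generalizing k with
  | nil => cases k <;> simp [CW, combosA]
  | cons x xs ih =>
    cases k with
    | zero => simp [CW, combosA]
    | succ k => simp [CW, combosA, ← ih, Function.comp_def]

theorem combosA_eq_nil (l : List (String × Int)) (k : Nat) (h : l.length < k) : combosA l k = [] := by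
  induction l generalizing k with
  | nil => cases k with | zero => simp at h | succ k => simp [combosA]
  | cons x xs ih =>
    cases k with
    | zero => simp at h
    | succ k =>
      simp at h
      simp [combosA]
      constructor
      · exact ih k (by omega)
      · exact ih (k+1) (by omega)

theorem childL_cons (x : String × Int) (c r : List (String × Int)) :
    childL (x :: c, r) = (childL (c, r)).map (fun d => (x :: d.1, d.2)) := by
  induction r with
  | nil => simp [childL]
  | cons p r ih => simp [childL, ih]

theorem CW_flatMap_childL (l : List (String × Int)) (k : Nat) :
    (CW l k).flatMap childL = CW l (k + 1) := by
  induction l generalizing k with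
  | nil =>
    cases k with
    | zero => simp [CW, childL]
    | succ k => simp [CW]
  | cons x xs ih =>
    cases k with
    | zero =>
      simp [CW, childL]
      rw [← ih 0]
      simp [CW]
    | succ k =>
      simp [CW, List.flatMap_append]
      rw [← ih (k+1), ← ih k]
      simp [List.flatMap_map, childL_cons]
      simp [List.map_flatMap]

theorem childL_shape {d : List (String × Int) × List (String × Int)} {c rest : List (String × Int)}
    (h : d ∈ childL (c, rest)) : ∃ p r', d = (c ++ [p], r') := by
  induction rest with
  | nil => simp [childL] at h
  | cons p r ih =>
    simp [childL] at h
    rcases h with h | h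
    · exact ⟨p, r, h⟩
    · exact ih h

theorem mini_prefix (target : Int) (pre suf : List (String × Int)) (hs : suf ≠ [])
    (h : mini target (pre ++ suf) = true) : Sm pre < target := by
  rcases suf with _ | ⟨q, t⟩
  · exact absurd rfl hs
  · simp [mini] at h
    obtain ⟨h1, hpre, hq, ht2⟩ := h
    have ht : 0 ≤ Sm t := by
      apply List.sum_nonneg
      intro y hy
      rw [List.mem_map] at hy
      obtain ⟨x, hx, rfl⟩ := hy
      have := ht2 x.1 x.2 (by simpa using hx)
      omega
    have hsum : Sm (pre ++ q :: t) = Sm pre + q.2 + Sm t := by simp [Sm]; ring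
    omega

theorem mini_imp_goodF (target : Int) (c : List (String × Int)) (p : String × Int)
    (h : mini target (c ++ [p]) = true) : goodF target c = true := by
  simp [goodF]
  intro pre hpre
  rcases eq_or_ne pre [] with rfl | hne
  · exact Or.inl rfl
  · right
    obtain ⟨t, rfl⟩ := hpre
    exact mini_prefix target pre (t ++ [p]) (by simp) (by simpa using h)

theorem goodF_append (target : Int) (c : List (String × Int)) (p : String × Int) :
    goodF target (c ++ [p]) = (goodF target c && decide (Sm (c ++ [p]) < target)) := by
  have he : (c ++ [p]).isEmpty = false := by simp
  simp only [goodF, List.inits_append, List.inits, List.all_append, List.map_cons, List.map_nil,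
    List.tail_cons, List.all_cons, List.all_nil, he]
  simp

theorem altExpand_spec (target : Int) (c rest : List (String × Int)) :
    altExpand target c (Sm c) rest =
      ( ((childL (c, rest)).map Prod.fst).filter (mini target),
        ((childL (c, rest)).filter (fun d => decide (Sm d.1 < target))).map
          (fun d => (d.1, d.2, Sm d.1)) ) := by
  induction rest with
  | nil => simp [altExpand, childL]
  | cons p rest ih =>
    have hs2 : Sm c + p.2 = Sm (c ++ [p]) := (Sm_append c p).symm
    simp only [altExpand, childL, ih, hs2]
    by_cases hw : target ≤ Sm (c ++ [p])
    · by_cases hall : ((c ++ [p]).all fun q => decide (Sm (c ++ [p]) - q.2 < target)) = true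
      · have hmini : mini target (c ++ [p]) = true := by simp [mini, hw, hall]
        simp [hw, hall, hmini, show ¬ Sm (c ++ [p]) < target by omega]
      · have hall' := Bool.eq_false_iff.mpr hall
        have hmini : mini target (c ++ [p]) = false := by simp [mini, hall']
        simp [hw, hall', hmini, show ¬ Sm (c ++ [p]) < target by omega]
    · have hmini : mini target (c ++ [p]) = false := by
        simp [mini]
        intro h
        omega
      simp [hw, hmini, show Sm (c ++ [p]) < target by omega]

theorem altLevel_spec (target : Int) (es : List (List (String × Int) × List (String × Int) × Int)) :
    altLevel target es =
      (es.flatMap (fun e => (altExpand target e.1 e.2.2 e.2.1).1),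
       es.flatMap (fun e => (altExpand target e.1 e.2.2 e.2.1).2)) := by
  induction es with
  | nil => simp [altLevel]
  | cons e es ih => simp [altLevel, ih]

theorem flatMap_filter_of_nil {α β : Type} (l : List α) (q : α → Bool) (f : α → List β)
    (h : ∀ x ∈ l, q x = false → f x = []) : (l.filter q).flatMap f = l.flatMap f := by
  induction l with
  | nil => simp
  | cons x xs ih =>
    rw [List.filter_cons]
    by_cases hq : q x
    · simp [hq, List.flatMap_cons, ih (fun y hy => h y (by simp [hy]))]
    · have := h x (by simp) (Bool.eq_false_iff.mpr hq)
      simp [hq, List.flatMap_cons, this, ih (fun y hy => h y (by simp [hy]))]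

theorem altLevel_step (lst : List (String × Int)) (target : Int) (k : Nat) :
    altLevel target (frontK lst target k) = (AllR lst target (k + 1), frontK lst target (k + 1)) := by
  rw [altLevel_spec]
  unfold frontK
  rw [List.flatMap_map, List.flatMap_map]
  have hexp : ∀ cr : List (String × Int) × List (String × Int),
      altExpand target cr.1 (Sm cr.1) cr.2 =
        ( ((childL cr).map Prod.fst).filter (mini target),
          ((childL cr).filter (fun d => decide (Sm d.1 < target))).map
            (fun d => (d.1, d.2, Sm d.1)) ) := fun cr => altExpand_spec target cr.1 cr.2
  simp only [hexp]
  rw [Prod.mk.injEq]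
  constructor
  · -- results component
    calc ((CW lst k).filter (fun cr => goodF target cr.1)).flatMap
          (fun cr => ((childL cr).map Prod.fst).filter (mini target))
        = (CW lst k).flatMap (fun cr => ((childL cr).map Prod.fst).filter (mini target)) := by
          apply flatMap_filter_of_nil
          intro cr _ hg
          rw [List.filter_eq_nil_iff]
          intro c2 hc2
          rw [List.mem_map] at hc2
          obtain ⟨d, hd, rfl⟩ := hc2
          obtain ⟨p, r', rfl⟩ := childL_shape (by exact (by simpa using hd))
          intro hm
          rw [mini_imp_goodF target cr.1 p hm] at hg
          exact Bool.true_eq_false.mp hg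
      _ = AllR lst target (k + 1) := by
          rw [← List.filter_flatMap, ← List.map_flatMap, CW_flatMap_childL, CW_map_fst]
          rfl
  · -- frontier component
    calc ((CW lst k).filter (fun cr => goodF target cr.1)).flatMap
          (fun cr => ((childL cr).filter (fun d => decide (Sm d.1 < target))).map
            (fun d => (d.1, d.2, Sm d.1)))
        = ((CW lst k).filter (fun cr => goodF target cr.1)).flatMap
          (fun cr => ((childL cr).filter (fun d => goodF target d.1)).map
            (fun d => (d.1, d.2, Sm d.1))) := by
          apply List.flatMap_congr
          intro cr hcr
          rw [List.mem_filter] at hcr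
          congr 1
          apply List.filter_congr
          intro d hd
          obtain ⟨p, r', rfl⟩ := childL_shape hd
          rw [goodF_append]
          simp [hcr.2]
      _ = (CW lst k).flatMap (fun cr => ((childL cr).filter (fun d => goodF target d.1)).map
            (fun d => (d.1, d.2, Sm d.1))) := by
          apply flatMap_filter_of_nil
          intro cr _ hg
          rw [List.map_eq_nil_iff, List.filter_eq_nil_iff]
          intro d hd
          obtain ⟨p, r', rfl⟩ := childL_shape (by exact (by simpa using hd))
          rw [goodF_append]
          simp
          intro hgc
          rw [hgc] at hg
          exact absurd hg (by simp)
      _ = frontK lst target (k + 1) := by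
          rw [← List.map_flatMap, ← List.filter_flatMap, CW_flatMap_childL]
          rfl

theorem altLoop_eq_ARs (lst : List (String × Int)) (target : Int) (fuel k : Nat) :
    altLoop target fuel (frontK lst target k) = ARs lst target k fuel := by
  induction fuel generalizing k with
  | zero =>
    rcases h : frontK lst target k with _ | ⟨e, es⟩ <;> simp [altLoop, ARs]
  | succ fuel ih =>
    rcases h : frontK lst target k with _ | ⟨e, es⟩
    · have hstep := altLevel_step lst target k
      rw [h] at hstep
      simp [altLevel] at hstep
      have h1 : AllR lst target (k + 1) = [] := hstep.1
      have h2 : frontK lst target (k + 1) = [] := hstep.2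
      simp [altLoop, ARs, h1]
      rw [← ih (k + 1), h2]
      simp [altLoop]
    · have hstep := altLevel_step lst target k
      rw [h] at hstep
      simp only [altLoop, ARs, ← h]
      rw [h, hstep]
      simp [← ih (k + 1)]

theorem ARs_eq_flatten (lst : List (String × Int)) (target : Int) (fuel k : Nat) :
    ARs lst target k fuel = ((List.range fuel).map (fun j => AllR lst target (k + 1 + j))).flatten := by
  induction fuel generalizing k with
  | zero => simp [ARs]
  | succ fuel ih =>
    rw [List.range_succ_eq_map]
    simp only [ARs, List.map_cons, List.map_map, List.flatten_cons, Nat.add_zero]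
    rw [ih (k + 1)]
    congr 1
    apply congrArg
    apply List.map_congr_left
    intro j hj
    simp only [Function.comp_def]
    congr 1
    omega

theorem foldl_cons_if {α : Type} (p : α → Bool) (l : List α) (acc : List α) :
    l.foldl (fun a x => if p x then x :: a else a) acc = (l.filter p).reverse ++ acc := by
  induction l generalizing acc with
  | nil => simp
  | cons x xs ih =>
    rw [List.foldl_cons, List.filter_cons]
    by_cases hp : p x <;> simp [hp, ih]

theorem foldl_rev_append {α β : Type} (g : α → List β) (l : List α) (acc : List β) :
    l.foldl (fun a x => (g x).reverse ++ a) acc = ((l.map g).flatten).reverse ++ acc := by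
  induction l generalizing acc with
  | nil => simp
  | cons x xs ih => simp [ih]

theorem minimal_test_eq (target : Int) (c : List (String × Int)) :
    minimal_test c (Sm c) target = mini target c := by
  have hfold : List.foldl (fun (cnt : Int) (p : String × Int) =>
      if Sm c - p.2 < target then cnt + 1 else cnt) 0 c =
      ((c.countP fun q => decide (Sm c - q.2 < target) : Nat) : Int) := by
    rw [show (fun (cnt : Int) (p : String × Int) => if Sm c - p.2 < target then cnt + 1 else cnt)
        = (fun cnt p => if (fun q => decide (Sm c - q.2 < target)) p = true then cnt + 1 else cnt)
      from by funext cnt p; simp]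
    rw [PySem.List.foldl_count_if]
    simp
  simp only [minimal_test, hfold, Nat.cast_inj]
  by_cases hlen : c.countP (fun q => decide (Sm c - q.2 < target)) = c.length
  · by_cases hw : target ≤ Sm c
    · simp [hlen, hw, mini]
      intro a b hab
      have := (List.countP_eq_length).mp hlen (a, b) hab
      simpa using this
    · simp [hlen, hw, mini]
  · simp [hlen, mini]
    intro hw
    by_contra hex
    push Not at hex
    apply hlen
    rw [List.countP_eq_length]
    intro a ha
    simp only [decide_eq_true_eq]
    have := hex a.1 a.2 (by simpa using ha)
    omega

theorem genA_eq (lst : List (String × Int)) (target : Int) :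
    generate_coalitions lst target =
      (((List.range lst.length).map (fun j => AllR lst target (j + 1))).flatten).reverse := by
  unfold generate_coalitions
  rw [PySem.List.pyRange_one]
  have hn : (((lst.length : Int) + 1) - 1).toNat = lst.length := by omega
  rw [hn, List.foldl_map]
  have hinner : ∀ (k : Nat) (acc : List (List (String × Int))),
      (combosA lst ((1 : Int) + (k : Int)).toNat).foldl (fun acc2 c =>
        let total := c.foldl (fun t q => t + q.2) 0
        if minimal_test c total target then PySem.List.insert acc2 0 c else acc2) acc
      = (AllR lst target (k + 1)).reverse ++ acc := by
    intro k acc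
    have hk : ((1 : Int) + (k : Int)).toNat = k + 1 := by omega
    rw [hk]
    have hbody : ∀ (acc2 : List (List (String × Int))) (c : List (String × Int)),
        (let total := c.foldl (fun t q => t + q.2) 0
         if minimal_test c total target then PySem.List.insert acc2 0 c else acc2)
        = (if mini target c then c :: acc2 else acc2) := by
      intro acc2 c
      have ht : c.foldl (fun t q => t + q.2) (0 : Int) = Sm c := by
        rw [PySem.List.foldl_add c (fun q => q.2) 0]; simp [Sm]
      simp only [ht, minimal_test_eq]
      by_cases h : mini target c <;> simp [h, PySem.List.insert_zero]
    simp only [hbody]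
    rw [foldl_cons_if (mini target) _ acc]
    rfl
  simp only [hinner]
  rw [foldl_rev_append (fun k => AllR lst target (k + 1)) (List.range lst.length) []]
  simp

theorem genB_eq (lst : List (String × Int)) (target : Int) :
    generate_coalitions_alt lst target =
      (((List.range lst.length).map (fun j => AllR lst target (j + 1))).flatten).reverse := by
  unfold generate_coalitions_alt
  have h0 : [(([] : List (String × Int)), lst, (0 : Int))] = frontK lst target 0 := by
    simp [frontK, CW, goodF, Sm]
  rw [h0, altLoop_eq_ARs, ARs_eq_flatten]
  rw [List.range_succ]
  simp only [List.map_append, List.flatten_append, List.map_cons, List.map_nil,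
    List.flatten_cons, List.flatten_nil, List.append_nil]
  have hnil : AllR lst target (0 + 1 + lst.length) = [] := by
    unfold AllR
    rw [combosA_eq_nil lst _ (by omega)]
    rfl
  rw [hnil, List.append_nil]
  congr 1
  apply congrArg
  apply List.map_congr_left
  intro j hj
  congr 1
  omega

-- ===== VERDICT (by name: the statement is the Claim_ definition above) =====
theorem generate_coalitions_spec : Claim_equal_generate_coalitions := by
  intro lst target _
  unfold Spec_generate_coalitions
  rw [genA_eq, genB_eq]
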